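/- GENERATED by tools/from_farm_form.py from farm/worked/_sub_I_65535_1/Proof.lean (a worked proof of the farm's unit `_sub_I_65535_1`,
   accepted by the verdict) — do not edit. -/
import Toy.Spec.Units.sub_I_65535_1
import Asan.CheckWalk
/- ADAPTED (renaming and numbers only) from the accepted stb_vorbis proof prooffarm-vorbis/work/_sub_I_65535_1.1/Proof.lean:
   table 1217C0H -> 141900H, 6 descriptors -> 3, entry 1038A0H -> 1054C0H. `import Toy.Dec.All`: the unit's statement does not bring
   the decode facts of the toy's code (the walker would make them on the fly inside the theorem: PANIC, GUIDE.md §5). -/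

open X86 X86.User Asan ProgX.Base

set_option maxRecDepth 4000
set_option maxHeartbeats 4000000

namespace Toy.Spec.Proved.sub_I_65535_1
open Toy.Spec.sub_I_65535_1 (Statement)

/-- Two memories that agree on a window still agree on it after the SAME one-byte store to both (wherever the store goes). -/
theorem eqOn_write_w {lo hi : Nat} {m m' : Mem} (h : Mem.EqOn lo hi m m') (a : Word) (v : Byte) :
    Mem.EqOn lo hi (m.write a v) (m'.write a v) := by
  intro x hx1 hx2
  by_cases e : a = x
  · subst e
    rw [Mem.read_write_same, Mem.read_write_same]
  · rw [Mem.read_write_other _ _ _ _ e, Mem.read_write_other _ _ _ _ e]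
    exact h x hx1 hx2

/-- The same for the byte-fill loop of the runtime (`fillMem`: `k` one-byte stores). -/
theorem eqOn_fillMem_w {lo hi : Nat} {m m' : Mem} (h : Mem.EqOn lo hi m m') (g : Nat) (v : Byte) (k : Nat) :
    Mem.EqOn lo hi (fillMem m g v k) (fillMem m' g v k) := by
  induction k generalizing m m' g with
  | zero => exact h
  | succ k ih =>
    simp only [fillMem]
    exact ih (eqOn_write_w h _ _) (g + 1)

/-- The same for the stores of one registration (`registerOne`: they do not depend on the memory's content). -/
theorem eqOn_registerOne_w {lo hi : Nat} {m m' : Mem} (h : Mem.EqOn lo hi m m') (d : GlobalDesc) :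
    Mem.EqOn lo hi (registerOne m d) (registerOne m' d) := by
  unfold registerOne
  apply eqOn_fillMem_w
  by_cases e : (d.beg + d.size) % 8 = 0
  · rw [if_pos e, if_pos e]
    exact h
  · rw [if_neg e, if_neg e]
    exact eqOn_write_w h _ _

/-- **`registerMem` respects agreement on a window**: the store sequence of `__asan_register_globals` is the same whatever the
memory holds, so two memories with the same shadow have the same shadow afterwards. This is what turns the callee's exact post
(`v.mem = registerMem s.mem descs`, `s` = the state after OUR push of the return address) into the constructor's post about `u.mem`. -/
theorem eqOn_registerMem_w {lo hi : Nat} {m m' : Mem} (h : Mem.EqOn lo hi m m') (ds : List GlobalDesc) :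
    Mem.EqOn lo hi (registerMem m ds) (registerMem m' ds) := by
  induction ds generalizing m m' with
  | nil => exact h
  | cons d ds ih =>
    have e1 : registerMem m (d :: ds) = registerMem (registerOne m d) ds := rfl
    have e2 : registerMem m' (d :: ds) = registerMem (registerOne m' d) ds := rfl
    rw [e1, e2]
    exact ih (eqOn_registerOne_w h d)

/-- **The descriptor table survives a store into the stack region**: the table of this image lies at `[141900H, 1419C0H)`, far
below the stack `[700000H, 800000H)`, so the `call`'s push of the return address does not change what the runtime reads. -/
theorem descsIn_push_w {m : Mem} (h : DescsIn m Toy.Spec.rt.table Toy.Spec.rt.descs) (a : Word) (v : Nat)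
    (ha1 : 0x700000 ≤ a.toNat) (ha2 : a.toNat + 8 ≤ 0x800000) :
    DescsIn (m.writeLE a 8 v) Toy.Spec.rt.table Toy.Spec.rt.descs := by
  intro i hi
  have hi3 : i < 3 := hi
  have htab : Toy.Spec.rt.table = 0x141900 := rfl
  obtain ⟨h1, h2, h3⟩ := h i hi
  have hw : Mem.NoWrap a 8 := by
    unfold Mem.NoWrap
    omega
  have key : ∀ off : Nat, off + 8 ≤ 64 →
      (m.writeLE a 8 v).readLE (UInt64.ofNat (Toy.Spec.rt.table + 64 * i + off)) 8 =
        m.readLE (UInt64.ofNat (Toy.Spec.rt.table + 64 * i + off)) 8 := by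
    intro off hoff
    have e : (UInt64.ofNat (Toy.Spec.rt.table + 64 * i + off)).toNat = Toy.Spec.rt.table + 64 * i + off := by
      rw [UInt64.toNat_ofNat', htab]
      omega
    apply Mem.readLE_writeLE_disjoint_noWrap _ _ _ _ _ _ hw
    · unfold Mem.NoWrap
      rw [e, htab]
      omega
    · left
      rw [e, htab]
      omega
  refine ⟨?_, ?_, ?_⟩
  · have := key 0 (by omega)
    rw [Nat.add_zero] at this
    rw [this]
    exact h1
  · rw [key 8 (by omega)]
    exact h2
  · rw [key 16 (by omega)]
    exact h3

/-- The shadow windows `__asan_register_globals` may write for the table of this image, as numbers: one per descriptor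
(`shadowSpan beg (beg + sizeRz)`), so that `u_same` / `u_eqon` / `u_omega` can compare them with the stack. -/
theorem registerWrites_rt_w :
    registerWrites Toy.Spec.rt.descs =
      [⟨12747648, 12747656⟩, ⟨12747520, 12747528⟩, ⟨12747328, 12747336⟩] := by
  rfl

/-- The windows of the callee's contract, as numbers. -/
theorem registerGlobalsSpec_writes_w (s : State) :
    (registerGlobalsSpec Toy.Spec.rt).writes s =
      [⟨12747648, 12747656⟩, ⟨12747520, 12747528⟩, ⟨12747328, 12747336⟩] :=
  registerWrites_rt_w

/-- The windows of the constructor's own contract, as numbers (the same three). -/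
theorem ctorSpec_writes_w (s : State) :
    (ctorSpec Toy.Spec.rt).writes s =
      [⟨12747648, 12747656⟩, ⟨12747520, 12747528⟩, ⟨12747328, 12747336⟩] :=
  registerWrites_rt_w

end Toy.Spec.Proved.sub_I_65535_1

/-- `_sub_I_65535_1` (the constructor gcc emitted, toy.c:80) satisfies `Asan.ctorSpec rt`: `sub rsp, 8`, the two constants,
a CALL TO A FUNCTION WITH A CONTRACT (`__asan_register_globals`, whose pre is our pre moved across the push of the return
address), `add rsp, 8 ; ret`. The post (the shadow is that of `registerMem u.mem descs`) follows from the callee's exact post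
by `eqOn_registerMem_w`. -/
theorem Toy.Spec.Proved.sub_I_65535_1_ok : Toy.Spec.sub_I_65535_1.Statement := by
  intro Lay hLay μ hμ u₀ hcode hreg u ret he hpre
  v_entry he
  obtain ⟨hdescs, hok⟩ := hpre
  -- 0x1054c0 … 0x1054ce: `sub rsp, 8 ; mov esi, 3 ; mov edi, 0x141900 ; call __asan_register_globals` (toy.c:80)
  u_walk hcode [hμ.vendor] span [ProgX.Base.L.textLo, ProgX.Base.L.textHi] side (v_side)
  · -- call_inv: DF and the MXCSR masks at the callee's entry (`sub` wrote status flags only)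
    show X86.User.abiInv _
    refine ProgX.Base.abiInv_of ?_ ?_
    · rw [w_flags]
      simp only [X86.User.df_setStatus]
      exact he_df
    · rw [w_mxcsr]
      exact he_mx
  · -- the callee's precondition
    refine ⟨?_, ?_, ?_, hok⟩
    · rw [w_rdi]
      rfl
    · rw [w_rsi]
      rfl
    · rw [w_mem]
      exact Toy.Spec.Proved.sub_I_65535_1.descsIn_push_w hdescs _ _ (by u_omega) (by u_omega)
  -- after the return of `__asan_register_globals` (0x1054d3): what its contract says, restated for the returned state
  -- (`w_post` stays closed during the walk: its `s.mem = registerMem …` would be taken for a `w_mem`)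
  have w_eq := ProgX.Base.conv_code_eqOn w_code
  have hdf : s_1054cer.flags .df = false := (show abiInv _ from w_inv).1
  have hmx : s_1054cer.mxcsr &&& 0x1F80 = 0x1F80 := (show abiInv _ from w_inv).2
  simp only [X86.User.Spec.footprint, vspec, w_rsp_1054ce,
    Toy.Spec.Proved.sub_I_65535_1.registerGlobalsSpec_writes_w] at w_same
  have hsame' : Mem.SameExcept
      [⟨(u.reg .rsp).toNat - 16, (u.reg .rsp).toNat⟩,
        ⟨12747648, 12747656⟩, ⟨12747520, 12747528⟩, ⟨12747328, 12747336⟩] u.mem s_1054cer.mem := by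
    u_same
  have hs0 : UInt64.ofNat (s_1054cer.mem.readLE (u.reg .rsp) 8) = ret := by
    u_frame he_retAddr
  u_walk hcode [hμ.vendor] span [ProgX.Base.L.textLo, ProgX.Base.L.textHi] side (v_side)
  -- 0x1054d7 `ret`: the contract's `Returned`
  refine ReachVia.done ?_
  refine X86.User.Returned.mk w_rip ?_ ?_ ?_ (ProgX.Base.conv_code_in w_eq) ?_ ?_
  · -- rsp: the return address has been popped
    exact w_rsp
  · -- the callee-saved registers: never written
    u_saved
  · -- the footprint: our 16 bytes of stack and the callee's three shadow windows
    simp only [X86.User.Spec.footprint, vspec, Toy.Spec.Proved.sub_I_65535_1.ctorSpec_writes_w]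
    rw [w_mem]
    exact hsame'
  · -- DF and the MXCSR masks: the callee's `Returned.inv`; `add` wrote status flags only
    show X86.User.abiInv _
    refine ProgX.Base.abiInv_of ?_ ?_
    · rw [w_flags]
      simp only [X86.User.df_setStatus]
      exact hdf
    · rw [w_mxcsr]
      exact hmx
  · -- the post: the SHADOW is that of `registerMem u.mem descs`. The callee's post is exact for the memory at ITS entry
    -- (ours + the pushed return address, a stack store); the store sequence does not depend on the memory's content
    obtain ⟨hmem, _⟩ := w_post
    show Mem.EqOn 0xC00000 0xE00000 (registerMem u.mem Toy.Spec.rt.descs) s_1054d7.mem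
    rw [w_mem, hmem]
    apply Toy.Spec.Proved.sub_I_65535_1.eqOn_registerMem_w
    rw [w_mem_1054ce]
    exact eqOn_shadow_writeLE _ _ _ _ (by u_omega) (by u_omega)
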